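-- pv_equiv track=rewrite | github.com/elmtalab/telegram-AI-agent | apps/router/config_llm_router.py | _expand_keys_expr
-- ===== SOURCE A (Python) =====
-- from typing import Any, Dict, List, Optional
--
-- def _expand_keys_expr(expr: str) -> List[str]:
--     out=[]
--     if not expr: return out
--     for alt in expr.split("|"):
--         for k in alt.split("+"):
--             k = k.strip()
--             if k: out.append(k)
--     return out
-- ===== SOURCE B (Python) =====
-- from typing import List
--
-- def _expand_keys_expr(expr: str) -> List[str]:
--     out = []
--     buf = []
--     for ch in expr:
--         if ch == '|' or ch == '+':
--             tok = ''.join(buf).strip()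
--             if tok:
--                 out.append(tok)
--             buf = []
--         else:
--             buf.append(ch)
--     tok = ''.join(buf).strip()
--     if tok:
--         out.append(tok)
--     return out
-- ===== Notes on version B (the rewrite author's own statement) =====
-- stated objective: alternative
-- what changed: Replaces the two nested str.split loops with a single character-level scan that maintains an explicit token buffer, flushing a stripped non-empty token at each '|' or '+' delimiter and once at the end.
import Mathlib
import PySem

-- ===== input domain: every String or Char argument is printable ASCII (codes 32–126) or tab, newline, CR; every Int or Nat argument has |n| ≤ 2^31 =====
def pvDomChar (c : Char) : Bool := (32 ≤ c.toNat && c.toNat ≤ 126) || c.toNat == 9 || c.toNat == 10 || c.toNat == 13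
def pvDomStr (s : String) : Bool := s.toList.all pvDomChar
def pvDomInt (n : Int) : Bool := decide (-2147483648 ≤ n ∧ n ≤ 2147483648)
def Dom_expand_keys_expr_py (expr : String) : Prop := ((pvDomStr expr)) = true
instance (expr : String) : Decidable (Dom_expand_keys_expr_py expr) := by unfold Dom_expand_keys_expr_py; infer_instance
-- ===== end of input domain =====

-- B replaces A's two nested str.split loops by a single character scan with an explicit
-- token buffer (objective: alternative decomposition; same linear cost).

-- ===== PORT A =====
-- for alt in expr.split("|"): for k in alt.split("+"): k = k.strip(); if k: out.append(k)
def expand_keys_expr_py (expr : String) : List String :=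
  let out : List String := []
  if expr = "" then out
  else
    (PySem.Chars.splitOn expr.toList ['|']).foldl (fun out alt =>
      (PySem.Chars.splitOn alt ['+']).foldl (fun out k =>
        let k := PySem.Chars.strip k
        if k ≠ [] then out ++ [String.ofList k] else out) out) out

-- ===== PORT B =====
-- single pass: on '|'/'+' flush the stripped buffer (if non-empty) into out, else extend the
-- buffer; after the loop flush the final buffer.
def expandKeysScan : List Char → List Char → List String → List String
  | [], buf, out =>
      let tok := PySem.Chars.strip buf
      if tok ≠ [] then out ++ [String.ofList tok] else out
  | c :: cs, buf, out =>
      if c = '|' ∨ c = '+' then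
        let tok := PySem.Chars.strip buf
        expandKeysScan cs [] (if tok ≠ [] then out ++ [String.ofList tok] else out)
      else
        expandKeysScan cs (buf ++ [c]) out

def expand_keys_expr_py_alt (expr : String) : List String :=
  expandKeysScan expr.toList [] []

-- ===== PRECONDITION & SPEC =====
def Spec_expand_keys_expr_py (expr : String) (out : List String) : Prop := out = expand_keys_expr_py_alt expr
instance (expr : String) (out : List String) : Decidable (Spec_expand_keys_expr_py expr out) := by unfold Spec_expand_keys_expr_py; infer_instance

-- ===== CLAIM (what is proved, stated in full; the proofs are below) =====
def Claim_equal_expand_keys_expr_py : Prop := ∀ (expr : String), Dom_expand_keys_expr_py expr → Spec_expand_keys_expr_py expr (expand_keys_expr_py expr)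

-- ===== LEMMAS AND PROOFS =====

def splitRec (d : Char) : List Char → List (List Char)
  | [] => [[]]
  | c :: cs => if c = d then [] :: splitRec d cs else List.modifyHead (c :: ·) (splitRec d cs)

lemma splitOn_go_spec (d : Char) (fuel : Nat) :
    ∀ (l cur : List Char) (accl : List (List Char)), l.length ≤ fuel →
      PySem.Chars.splitOn.go [d] fuel l cur accl =
        accl.reverse ++ List.modifyHead (cur.reverse ++ ·) (splitRec d l) := by
  induction fuel with
  | zero =>
      intro l cur accl hl
      have : l = [] := by cases l <;> simp_all
      subst this
      simp [PySem.Chars.splitOn.go, splitRec]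
  | succ n ih =>
      intro l cur accl hl
      cases l with
      | nil => simp [PySem.Chars.splitOn.go, splitRec]
      | cons c rest =>
          simp only [PySem.Chars.splitOn.go]
          by_cases hc : c = d
          · subst hc
            have hpre : List.isPrefixOf [c] (c :: rest) = true := by simp [List.isPrefixOf]
            rw [if_pos hpre]
            rw [ih _ _ _ (by simpa using Nat.le_of_succ_le_succ hl)]
            simp [splitRec]
            exact congrFun List.modifyHead_id _
          · have hpre : List.isPrefixOf [d] (c :: rest) = false := by
              simp [List.isPrefixOf]
              intro h; exact absurd h.symm hc
            rw [if_neg (by simp [hpre])]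
            rw [ih _ _ _ (by simpa using Nat.le_of_succ_le_succ hl)]
            simp only [splitRec, if_neg hc, List.modifyHead_modifyHead]
            congr 1
            congr 1
            funext t
            simp

lemma splitOn_eq_splitRec (d : Char) (cs : List Char) :
    PySem.Chars.splitOn cs [d] = splitRec d cs := by
  have := splitOn_go_spec d (cs.length + 1) cs [] [] (by omega)
  rw [PySem.Chars.splitOn, this]
  exact congrFun List.modifyHead_id _

lemma splitRec_ne_nil (d : Char) (cs : List Char) : splitRec d cs ≠ [] := by
  induction cs with
  | nil => simp [splitRec]
  | cons c cs ih =>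
      simp only [splitRec]
      split_ifs
      · simp
      · cases h : splitRec d cs with
        | nil => exact absurd h ih
        | cons x xs => simp

lemma splitRec_self_free (d : Char) (buf : List Char) (h : d ∉ buf) :
    splitRec d buf = [buf] := by
  induction buf with
  | nil => rfl
  | cons b bs ih =>
      simp only [List.mem_cons, not_or] at h
      simp [splitRec, Ne.symm h.1, ih h.2]

lemma splitRec_append (d : Char) (buf t : List Char) (h : d ∉ buf) :
    splitRec d (buf ++ d :: t) = buf :: splitRec d t := by
  induction buf with
  | nil => simp [splitRec]
  | cons b bs ih =>
      simp only [List.mem_cons, not_or] at h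
      simp [splitRec, Ne.symm h.1, ih h.2]

def emitTok (k : List Char) : List String :=
  if PySem.Chars.strip k ≠ [] then [String.ofList (PySem.Chars.strip k)] else []

def gAlt (alt : List Char) : List String := (splitRec '+' alt).flatMap emitTok

lemma gAlt_free (buf : List Char) (h : '+' ∉ buf) : gAlt buf = emitTok buf := by
  simp [gAlt, splitRec_self_free _ _ h]

def refF : List Char → List Char → List String
  | [], buf => emitTok buf
  | c :: cs, buf => if c = '|' ∨ c = '+' then emitTok buf ++ refF cs [] else refF cs (buf ++ [c])

lemma scan_eq_refF (cs : List Char) : ∀ buf out, expandKeysScan cs buf out = out ++ refF cs buf := by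
  induction cs with
  | nil => intro buf out; simp only [expandKeysScan, refF, emitTok]; split_ifs <;> simp
  | cons c cs ih =>
      intro buf out
      by_cases h : c = '|' ∨ c = '+'
      · simp only [expandKeysScan, refF, if_pos h]
        rw [ih]
        simp only [emitTok]
        split_ifs <;> simp
      · simp only [expandKeysScan, refF, if_neg h]
        exact ih _ _

lemma refF_eq (cs : List Char) : ∀ buf, '|' ∉ buf → '+' ∉ buf →
    refF cs buf = (List.modifyHead (buf ++ ·) (splitRec '|' cs)).flatMap gAlt := by
  induction cs with
  | nil =>
      intro buf h1 h2
      simp only [refF, splitRec, List.modifyHead, List.append_nil, List.flatMap_cons,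
        List.flatMap_nil, List.append_nil]
      exact (gAlt_free _ h2).symm
  | cons c cs ih =>
      intro buf h1 h2
      simp only [refF, splitRec]
      by_cases hbar : c = '|'
      · subst hbar
        rw [if_pos (Or.inl rfl), if_pos rfl]
        simp only [List.modifyHead, List.flatMap_cons, List.append_nil]
        rw [ih [] (by simp) (by simp)]
        have : List.modifyHead (fun x => ([] : List Char) ++ x) (splitRec '|' cs) = splitRec '|' cs :=
          congrFun List.modifyHead_id _
        rw [this]
        rw [gAlt_free _ h2]
      · by_cases hplus : c = '+'
        · subst hplus
          rw [if_pos (Or.inr rfl), if_neg (by decide)]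
          rw [List.modifyHead_modifyHead]
          cases hX : splitRec '|' cs with
          | nil => exact absurd hX (splitRec_ne_nil _ _)
          | cons x xs =>
              simp only [List.modifyHead, Function.comp, List.flatMap_cons]
              rw [ih [] (by simp) (by simp), hX]
              have : List.modifyHead (fun t => ([] : List Char) ++ t) (x :: xs) = x :: xs :=
                congrFun List.modifyHead_id _
              rw [this]
              simp only [gAlt]
              rw [splitRec_append _ _ _ h2]
              simp [gAlt, List.append_assoc]
        · rw [if_neg (by tauto), if_neg hbar]
          rw [List.modifyHead_modifyHead]
          have hcomp : ((fun x => buf ++ x) ∘ (fun x => c :: x)) = (fun x => (buf ++ [c]) ++ x) := by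
            funext t; simp
          rw [hcomp]
          apply ih (buf ++ [c])
          · intro hm
            rcases List.mem_append.1 hm with hm | hm
            · exact h1 hm
            · simp at hm; exact hbar hm.symm
          · intro hm
            rcases List.mem_append.1 hm with hm | hm
            · exact h2 hm
            · simp at hm; exact hplus hm.symm

lemma foldl_emit_acc (l : List (List Char)) (acc : List String) :
    l.foldl (fun out k =>
        let k := PySem.Chars.strip k
        if k ≠ [] then out ++ [String.ofList k] else out) acc = acc ++ l.flatMap emitTok := by
  induction l generalizing acc with
  | nil => simp
  | cons x xs ih =>
      simp only [List.foldl_cons, List.flatMap_cons, emitTok]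
      rw [ih]
      split_ifs <;> simp

-- ===== VERDICT (by name: the statement is the Claim_ definition above) =====
theorem expand_keys_expr_py_spec : Claim_equal_expand_keys_expr_py := by
  intro expr _
  unfold Spec_expand_keys_expr_py expand_keys_expr_py expand_keys_expr_py_alt
  by_cases he : expr = ""
  · subst he; simp [expandKeysScan, PySem.Chars.strip, PySem.Chars.lstrip, PySem.Chars.rstrip]
  · rw [if_neg he]
    rw [scan_eq_refF, refF_eq expr.toList [] (by simp) (by simp)]
    have hid : List.modifyHead (fun x => ([] : List Char) ++ x) (splitRec '|' expr.toList)
        = splitRec '|' expr.toList := congrFun List.modifyHead_id _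
    rw [hid]
    have hfun : (fun (out : List String) (alt : List Char) =>
        (PySem.Chars.splitOn alt ['+']).foldl (fun out k =>
          let k := PySem.Chars.strip k
          if k ≠ [] then out ++ [String.ofList k] else out) out)
        = fun out alt => out ++ gAlt alt := by
      funext out alt
      rw [splitOn_eq_splitRec]
      exact foldl_emit_acc (splitRec '+' alt) out
    rw [hfun, PySem.List.foldl_append_eq_flatMap, splitOn_eq_splitRec]
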